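-- pv_equiv track=rewrite | github.com/bobrayEden/python-katas | logic.py | beggars
-- ===== SOURCE A (Python) =====
-- def beggars(values, n):
--     if n == 0:
--         return []
--     if n == 1:
--         return [(sum(values))]
--     nMoney = [0] * n
--     pos = 0
--     # Cycler la file de beggars dans la file de valeurs
--     # et compter ce qu'ils ramassent
--     for i in values:
--         if pos < n - 1:
--             nMoney[pos] += i
--             pos += 1
--         elif pos == n - 1:
--             nMoney[pos] += i
--             pos = 0
--     return nMoney
-- ===== SOURCE B (Python) =====
-- def beggars(values, n):
--     return [sum(values[j::n]) for j in range(n)]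
-- ===== Notes on version B (the rewrite author's own statement) =====
-- stated objective: simpler
-- what changed: Replaces the stateful cyclic sweep (running position pointer with wrap-around branches and an in-place accumulator list) by a one-line comprehension summing each beggar's strided slice values[j::n]; range(n) makes n<=0 and n==1 fall out naturally with no special cases.
import Mathlib
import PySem

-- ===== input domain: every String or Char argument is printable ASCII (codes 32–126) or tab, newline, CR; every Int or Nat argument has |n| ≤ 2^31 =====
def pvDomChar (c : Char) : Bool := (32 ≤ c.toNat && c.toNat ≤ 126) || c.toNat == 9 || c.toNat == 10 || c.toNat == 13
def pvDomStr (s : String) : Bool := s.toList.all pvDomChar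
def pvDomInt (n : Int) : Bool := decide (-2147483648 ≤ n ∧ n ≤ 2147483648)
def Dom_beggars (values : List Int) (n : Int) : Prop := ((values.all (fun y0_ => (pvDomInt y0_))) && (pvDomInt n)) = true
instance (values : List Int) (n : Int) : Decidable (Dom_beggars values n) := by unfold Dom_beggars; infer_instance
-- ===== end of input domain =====

-- B replaces A's stateful cyclic sweep (position pointer + wrap-around branches over one
-- accumulator list) by summing each beggar's strided slice values[j::n]; objective: simpler.

-- ===== PORT A =====
-- loop body of A's 'for i in values', state (nMoney, pos); 'nMoney[pos] += i' via set/getD is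
-- exact here since whenever a branch fires, 0 ≤ pos < n = len(nMoney)
def beggarsStep (n : Int) (st : List Int × Int) (i : Int) : List Int × Int :=
  if st.2 < n - 1 then (st.1.set st.2.toNat (st.1.getD st.2.toNat 0 + i), st.2 + 1)
  else if st.2 = n - 1 then (st.1.set st.2.toNat (st.1.getD st.2.toNat 0 + i), 0)
  else (st.1, st.2)

def beggars (values : List Int) (n : Int) : List Int :=
  if n = 0 then []
  else if n = 1 then [values.sum]
  else
    -- nMoney = [0] * n  (empty when n < 0, as in Python); pos = 0
    (values.foldl (beggarsStep n) (List.replicate n.toNat 0, 0)).1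

-- ===== PORT B =====
-- [sum(values[j::n]) for j in range(n)]; slice? never returns none here (n ≠ 0 for j in
-- range(n)), so '.getD []' only totalizes the expression
def beggars_alt (values : List Int) (n : Int) : List Int :=
  (PySem.List.pyRange 0 n 1).map
    (fun j => ((PySem.List.slice? values (some j) none n).getD []).sum)

-- ===== PRECONDITION & SPEC =====
def Spec_beggars (values : List Int) (n : Int) (out : List Int) : Prop := out = beggars_alt values n
instance (values : List Int) (n : Int) (out : List Int) : Decidable (Spec_beggars values n out) := by unfold Spec_beggars; infer_instance

-- ===== CLAIM (what is proved, stated in full; the proofs are below) =====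
def Claim_equal_beggars : Prop := ∀ (values : List Int) (n : Int), Dom_beggars values n → Spec_beggars values n (beggars values n)

-- ===== LEMMAS AND PROOFS =====

-- sum of every m-th element of vs starting at offset j (the value of sum(vs[j::m]) for 0 < m)
def strideSum : List Int → Nat → Nat → Int
  | [], _, _ => 0
  | v :: vs, 0, m => v + strideSum vs (m - 1) m
  | _ :: vs, d + 1, m => strideSum vs d m

-- number of elements of vs[j::m] when len vs = len
def scount (len j m : Nat) : Nat := if j < len then (len - j + m - 1) / m else 0

lemma strideSum_eq_sum_range (vs : List Int) (j m : Nat) (hm : 1 ≤ m) :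
    strideSum vs j m
      = ((List.range (scount vs.length j m)).map (fun k => vs.getD (j + m * k) 0)).sum := by
  induction vs generalizing j with
  | nil => simp [strideSum, scount]
  | cons v vs ih =>
      cases j with
      | zero =>
          have hc : scount (v :: vs).length 0 m = scount vs.length (m - 1) m + 1 := by
            simp only [scount, List.length_cons]
            by_cases h : m - 1 < vs.length
            · rw [if_pos (by omega), if_pos h]
              have h1 : vs.length + 1 - 0 + m - 1 = (vs.length - (m-1) + m - 1) + m := by omega
              rw [h1, Nat.add_div_right _ (by omega)]
            · rw [if_pos (by omega), if_neg h]
              have h1 : vs.length + 1 - 0 + m - 1 = vs.length + m := by omega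
              rw [h1, Nat.add_div_right _ (by omega)]
              have : vs.length / m = 0 := Nat.div_eq_of_lt (by omega)
              omega
          rw [hc, List.range_succ_eq_map]
          simp only [List.map_cons, List.sum_cons, List.map_map]
          have he : ∀ k, ((v :: vs).getD (0 + m * (k+1)) 0) = vs.getD ((m-1) + m * k) 0 := by
            intro k
            have h2 : m * (k+1) = m * k + m := by ring
            have h1 : 0 + m * (k+1) = ((m-1) + m * k) + 1 := by omega
            rw [h1, List.getD_cons_succ]
          have hmap : ((List.range (scount vs.length (m-1) m)).map
              ((fun k => (v :: vs).getD (0 + m * k) 0) ∘ Nat.succ)).sum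
              = ((List.range (scount vs.length (m-1) m)).map (fun k => vs.getD ((m-1) + m * k) 0)).sum := by
            apply congrArg
            apply List.map_congr_left
            intro k _
            exact he k
          rw [hmap, strideSum, ih (m-1)]
          simp
      | succ d =>
          have hc : scount (v :: vs).length (d+1) m = scount vs.length d m := by
            simp only [scount, List.length_cons]
            by_cases h : d < vs.length
            · rw [if_pos (by omega), if_pos h]
              congr 1; omega
            · rw [if_neg (by omega), if_neg h]
          rw [hc, strideSum, ih d]
          apply congrArg
          apply List.map_congr_left
          intro k _
          have h1 : d + 1 + m * k = (d + m * k) + 1 := by omega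
          rw [h1, List.getD_cons_succ]

lemma sum_filterMap_range (c : Nat) (g : Nat → Nat) (vs : List Int)
    (h : ∀ k < c, g k < vs.length) :
    ((List.range c).filterMap (fun k => vs[g k]?)).sum
      = ((List.range c).map (fun k => vs.getD (g k) 0)).sum := by
  induction c with
  | zero => rfl
  | succ c ih =>
      rw [List.range_succ, List.filterMap_append, List.map_append,
        List.sum_append, List.sum_append, ih (fun k hk => h k (by omega))]
      have hlt : g c < vs.length := h c (by omega)
      simp [List.getElem?_eq_getElem hlt]

-- entry j of B's comprehension: sum(vs[j::m]) = strideSum vs j m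
lemma alt_entry (vs : List Int) (j m : Nat) (hm : 1 ≤ m) :
    ((PySem.List.slice? vs (some (j : Int)) none (m : Int)).getD []).sum = strideSum vs j m := by
  simp only [PySem.List.slice?, PySem.List.sliceIndices]
  rw [if_neg (by exact_mod_cast (by omega : ¬ (m : Int) = 0))]
  have hm0 : ¬ ((m:Int) < 0) := by omega
  have hj0 : ¬ ((j:Int) < 0) := by omega
  have hmp : (0:Int) < (m:Int) := by omega
  simp only [if_neg hj0, if_neg hm0, if_pos hmp, Option.getD_some]
  by_cases hjl : j < vs.length
  · have hmin : min (j:Int) (vs.length:Int) = (j:Int) := by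
      simp; omega
    rw [hmin, if_pos (by exact_mod_cast hjl)]
    have hcnt : (((vs.length:Int) - (j:Int) + (m:Int) - 1) / (m:Int)).toNat
        = scount vs.length j m := by
      have h1 : ((vs.length:Int) - (j:Int) + (m:Int) - 1) = ((vs.length - j + m - 1 : Nat) : Int) := by
        omega
      rw [h1, ← Int.natCast_ediv, Int.toNat_natCast, scount, if_pos hjl]
    rw [hcnt]
    have hfun : ∀ k : Nat, vs[((j:Int) + (m:Int) * (k:Int)).toNat]? = vs[j + m * k]? := by
      intro k
      have h2 : ((j:Int) + (m:Int) * (k:Int)) = ((j + m * k : Nat) : Int) := by push_cast; ring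
      rw [h2, Int.toNat_natCast]
    simp only [hfun]
    have hvalid : ∀ k < scount vs.length j m, j + m * k < vs.length := by
      intro k hk
      rw [scount, if_pos hjl] at hk
      have h3 : (k + 1) * m ≤ vs.length - j + m - 1 :=
        (Nat.le_div_iff_mul_le (by omega : 0 < m)).mp (by omega)
      have h4 : (k + 1) * m = m * k + m := by ring
      omega
    rw [sum_filterMap_range _ _ _ hvalid, ← strideSum_eq_sum_range vs j m hm]
  · have hmin : min (j:Int) (vs.length:Int) = (vs.length:Int) := by
      simp; omega
    rw [hmin, if_neg (by omega)]
    simp only [List.range_zero, List.filterMap_nil, List.sum_nil]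
    rw [strideSum_eq_sum_range vs j m hm, scount, if_neg hjl]
    simp

lemma getD_set_self (l : List Int) (i : Nat) (a : Int) (h : i < l.length) :
    (l.set i a).getD i 0 = a := by
  simp [List.getD_eq_getElem?_getD, List.getElem?_set_self', List.getElem?_eq_getElem h]

lemma getD_set_ne (l : List Int) (i j : Nat) (a : Int) (h : i ≠ j) :
    (l.set i a).getD j 0 = l.getD j 0 := by
  simp [List.getD_eq_getElem?_getD, List.getElem?_set_ne h]

lemma strideSum_cons_pos (v : Int) (vs : List Int) (d m : Nat) (hd : 1 ≤ d) :
    strideSum (v :: vs) d m = strideSum vs (d - 1) m := by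
  obtain ⟨e, rfl⟩ : ∃ e, d = e + 1 := ⟨d - 1, by omega⟩
  rfl

lemma loop_len (n : Int) (vs : List Int) (L : List Int) (p : Int) :
    ((vs.foldl (beggarsStep n) (L, p)).1).length = L.length := by
  induction vs generalizing L p with
  | nil => rfl
  | cons v vs ih =>
      simp only [List.foldl_cons, beggarsStep]
      split_ifs <;> simp [ih]

-- invariant of A's sweep: beggar j's final total is its current total plus the stride sum
-- at the offset where the cycling pointer p next reaches j
lemma loop_getD (m : Nat) (hm : 2 ≤ m) (vs : List Int) :
    ∀ (L : List Int) (p j : Nat), L.length = m → p < m → j < m →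
    ((vs.foldl (beggarsStep (m : Int)) (L, (p : Int))).1).getD j 0
      = L.getD j 0 + strideSum vs (if p ≤ j then j - p else j + m - p) m := by
  induction vs with
  | nil => intro L p j hL hp hj; simp [strideSum]
  | cons v vs ih =>
      intro L p j hL hp hj
      simp only [List.foldl_cons, beggarsStep]
      by_cases hlt : p + 1 < m
      · rw [if_pos (by omega)]
        have ht : ((p : Int)).toNat = p := Int.toNat_natCast p
        have hcast : (p : Int) + 1 = ((p + 1 : Nat) : Int) := by push_cast; ring
        rw [ht, hcast, ih (L.set p (L.getD p 0 + v)) (p + 1) j (by simp [hL]) (by omega) hj]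
        by_cases hj_p : j = p
        · subst hj_p
          rw [if_neg (by omega), if_pos (by omega)]
          rw [getD_set_self _ _ _ (by omega)]
          have h1 : j + m - (j + 1) = m - 1 := by omega
          have h0 : j - j = 0 := by omega
          rw [h1, h0, strideSum]
          ring
        · rw [getD_set_ne _ _ _ _ (by omega)]
          congr 1
          by_cases hpj : p ≤ j
          · rw [if_pos hpj, if_pos (by omega), strideSum_cons_pos _ _ _ _ (by omega)]
            rw [Nat.sub_sub]
          · rw [if_neg hpj, if_neg (by omega), strideSum_cons_pos _ _ _ _ (by omega)]
            rw [Nat.sub_sub]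
      · have hpm : p = m - 1 := by omega
        rw [if_neg (by omega), if_pos (by omega)]
        have ht : ((p : Int)).toNat = p := Int.toNat_natCast p
        rw [ht]
        have hI := ih (L.set p (L.getD p 0 + v)) 0 j (by simp [hL]) (by omega) hj
        rw [Nat.cast_zero] at hI
        rw [hI, if_pos (by omega)]
        by_cases hj_p : j = p
        · subst hj_p
          rw [if_pos (by omega)]
          rw [getD_set_self _ _ _ (by omega)]
          have h0 : j - j = 0 := by omega
          rw [h0, strideSum]
          have h1 : j - 0 = m - 1 := by omega
          rw [h1]; ring
        · rw [getD_set_ne _ _ _ _ (by omega)]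
          congr 1
          rw [if_neg (by omega), strideSum_cons_pos _ _ _ _ (by omega)]
          have h2 : j + m - p - 1 = j - 0 := by omega
          rw [h2]

lemma loop_nonpos (n : Int) (hn : n < 0) (vs : List Int) :
    vs.foldl (beggarsStep n) ([], 0) = ([], 0) := by
  induction vs with
  | nil => rfl
  | cons v vs ih =>
      simp only [List.foldl_cons, beggarsStep]
      rw [if_neg (by omega), if_neg (by omega)]
      exact ih

lemma strideSum_zero_one (vs : List Int) : strideSum vs 0 1 = vs.sum := by
  induction vs with
  | nil => rfl
  | cons v vs ih => simp [strideSum, ih]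

-- ===== VERDICT (by name: the statement is the Claim_ definition above) =====
theorem beggars_spec : Claim_equal_beggars := by
  intro values n _
  unfold Spec_beggars beggars beggars_alt
  by_cases h0 : n = 0
  · subst h0
    rw [if_pos rfl, PySem.List.pyRange_one_eq_nil (le_refl 0)]
    simp
  by_cases h1 : n = 1
  · subst h1
    rw [if_neg h0, if_pos rfl]
    rw [show PySem.List.pyRange 0 1 1 = [(0:Int)] by decide]
    simp only [List.map_cons, List.map_nil]
    have := alt_entry values 0 1 (le_refl 1)
    rw [Nat.cast_zero, Nat.cast_one] at this
    rw [this, strideSum_zero_one]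
  by_cases hneg : n < 0
  · rw [if_neg h0, if_neg h1, PySem.List.pyRange_one_eq_nil (by omega)]
    have hz : n.toNat = 0 := by omega
    rw [hz, List.replicate_zero, loop_nonpos n hneg values]
    simp
  · -- n ≥ 2
    obtain ⟨m, rfl⟩ : ∃ m : Nat, n = (m:Int) := ⟨n.toNat, by omega⟩
    have hm : 2 ≤ m := by omega
    have hmt : ((m:Int)).toNat = m := Int.toNat_natCast m
    rw [if_neg h0, if_neg h1, hmt]
    apply List.ext_getElem
    · rw [loop_len, List.length_replicate, List.length_map,
        PySem.List.length_pyRange_one]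
      omega
    · intro i hiA hiB
      have him : i < m := by
        rw [loop_len, List.length_replicate] at hiA; exact hiA
      have hA : ((values.foldl (beggarsStep (m:Int)) (List.replicate m 0, 0)).1)[i]
          = strideSum values i m := by
        rw [← List.getD_eq_getElem _ 0 hiA]
        have hI := loop_getD m hm values (List.replicate m 0) 0 i
          (List.length_replicate) (by omega) him
        rw [Nat.cast_zero] at hI
        rw [hI, if_pos (by omega)]
        simp
      have hB : ((PySem.List.pyRange 0 (m:Int) 1).map
          (fun j => ((PySem.List.slice? values (some j) none (m:Int)).getD []).sum))[i]
          = strideSum values i m := by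
        rw [List.getElem_map, PySem.List.getElem_pyRange_one]
        rw [show (0:Int) + (i:Int) = ((i:Nat):Int) by ring]
        exact alt_entry values i m (by omega)
      rw [hA, hB]
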